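-- pv_equiv track=rewrite | github.com/dawoodaijaz97/Leetcode | maximum-walls-destroyed-by-robots/solution.py | solve
-- ===== SOURCE A (Python) =====
-- from typing import List
-- from bisect import bisect_left, bisect_right
--
-- def solve(robots: List[int], distance: List[int], walls: List[int]) -> int:
--     """
--     Calculate the maximum number of unique walls that can be destroyed by robots.
--
--     :param robots: List of robot positions.
--     :param distance: List of maximum distances each robot's bullet can travel.
--     :param walls: List of wall positions.
--     :return: Maximum number of unique walls that can be destroyed.
--     """
--     # Sort walls for efficient range checking
--     walls.sort()
--
--     # Use a set to track unique walls destroyed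
--     destroyed_walls = set()
--
--     for i, robot in enumerate(robots):
--         max_range = distance[i]
--
--         # Calculate the left and right bounds of the bullet's range
--         left_bound = robot - max_range
--         right_bound = robot + max_range
--
--         # Find the first wall within the range using binary search
--         left_index = bisect_left(walls, left_bound)
--         right_index = bisect_right(walls, right_bound)
--
--         # Add all walls within the range to the set of destroyed walls
--         for j in range(left_index, right_index):
--             if walls[j] >= robot:
--                 break  # Stop at the first wall that is on or after the robot
--             destroyed_walls.add(walls[j])
--
--     return len(destroyed_walls)
-- ===== SOURCE B (Python) =====
-- from typing import List
--
-- def solve(robots: List[int], distance: List[int], walls: List[int]) -> int: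
--     # Count distinct walls that some robot covers strictly to its left:
--     # wall w is destroyed iff r - d <= w < r for some paired (r, d).
--     # (Return value only: unlike A, this does not sort `walls` in place.)
--     pairs = list(zip(robots, distance))
--     return sum(1 for w in set(walls) if any(r - d <= w < r for r, d in pairs))
-- ===== Notes on version B (the rewrite author's own statement) =====
-- stated objective: simpler
-- what changed: B drops A's in-place sort, per-robot bisect windows with an early break and the mutable destroyed-set, and instead directly counts the distinct wall values w for which some (robot, distance) pair satisfies r - d <= w < r.
import Mathlib
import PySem

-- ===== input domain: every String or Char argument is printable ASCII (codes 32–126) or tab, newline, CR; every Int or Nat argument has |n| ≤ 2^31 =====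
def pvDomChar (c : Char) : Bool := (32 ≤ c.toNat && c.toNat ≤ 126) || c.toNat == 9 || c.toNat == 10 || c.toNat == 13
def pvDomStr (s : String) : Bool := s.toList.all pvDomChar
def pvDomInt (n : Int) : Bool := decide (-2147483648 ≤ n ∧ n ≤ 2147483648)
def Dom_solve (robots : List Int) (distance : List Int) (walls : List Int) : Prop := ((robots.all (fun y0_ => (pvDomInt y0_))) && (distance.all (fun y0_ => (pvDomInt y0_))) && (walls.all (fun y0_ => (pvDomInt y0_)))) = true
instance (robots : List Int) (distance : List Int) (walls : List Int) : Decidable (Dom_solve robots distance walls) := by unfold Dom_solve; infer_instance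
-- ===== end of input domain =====

-- B replaces A's sort + bisect windows + mutable destroyed-set by a direct count over the
-- distinct walls of the predicate "some (robot, distance) pair covers the wall left of the robot"
-- (objective: simpler). Return value only: A sorts `walls` in place, B does not mutate it.

-- ===== PORT A =====
-- inner loop: `for j in range(left_index, right_index): if walls[j] >= robot: break; destroyed.add(walls[j])`
def solveInner (ws : List Int) (robot : Int) (ri : Nat) (j : Nat) (s : PySem.Set Int) : PySem.Set Int :=
  if j < ri then
    if robot ≤ ws.getD j 0 then s
    else solveInner ws robot ri (j + 1) (PySem.Set.add s (ws.getD j 0))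
  else s
termination_by ri - j

def solve (robots : List Int) (distance : List Int) (walls : List Int) : Int :=
  let ws := PySem.List.sorted walls (fun x => x) false   -- walls.sort()
  let s := (PySem.List.enumerate robots 0).foldl (fun s p =>
    let d := (PySem.List.pyGet? distance p.1).getD 0     -- distance[i]; IndexError (= none) excluded by Pre_solve
    let li := PySem.List.bisectLeft ws (p.2 - d)
    let ri := PySem.List.bisectRight ws (p.2 + d)
    solveInner ws p.2 ri li s) PySem.Set.empty
  PySem.Set.len s

-- ===== PORT B =====
def solve_alt (robots : List Int) (distance : List Int) (walls : List Int) : Int :=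
  let pairs := robots.zip distance
  Int.ofNat ((PySem.Set.ofList walls).countP
    (fun w => pairs.any (fun q => decide (q.1 - q.2 ≤ w ∧ w < q.1))))

-- ===== PRECONDITION & SPEC =====
-- A evaluates distance[i] for every i < len(robots): it raises IndexError exactly when
-- len(distance) < len(robots); those inputs are excluded.
def Pre_solve (robots : List Int) (distance : List Int) (walls : List Int) : Prop :=
  robots.length ≤ distance.length
instance (robots : List Int) (distance : List Int) (walls : List Int) : Decidable (Pre_solve robots distance walls) := by unfold Pre_solve; infer_instance
def pvWitness_solve : List Int × List Int × List Int := ([1], [1], [0])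

def Spec_solve (robots : List Int) (distance : List Int) (walls : List Int) (out : Int) : Prop := out = solve_alt robots distance walls
instance (robots : List Int) (distance : List Int) (walls : List Int) (out : Int) : Decidable (Spec_solve robots distance walls out) := by unfold Spec_solve; infer_instance

-- ===== CLAIM (what is proved, stated in full; the proofs are below) =====
def Claim_equal_solve : Prop := ∀ (robots : List Int) (distance : List Int) (walls : List Int), Dom_solve robots distance walls → Pre_solve robots distance walls → Spec_solve robots distance walls (solve robots distance walls)

-- ===== LEMMAS AND PROOFS =====

-- the outer loop body of `solve`, written out (zeta-reduced form of its lets)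
def stepA (ws : List Int) (distance : List Int) : PySem.Set Int → (Int × Int) → PySem.Set Int :=
  fun s p =>
    solveInner ws p.2
      (PySem.List.bisectRight ws (p.2 + (PySem.List.pyGet? distance p.1).getD 0))
      (PySem.List.bisectLeft ws (p.2 - (PySem.List.pyGet? distance p.1).getD 0)) s

theorem solve_eq_stepA (robots distance walls : List Int) :
    solve robots distance walls =
      PySem.Set.len ((PySem.List.enumerate robots 0).foldl
        (stepA (PySem.List.sorted walls (fun x => x) false) distance) PySem.Set.empty) := rfl

-- membership after the inner loop: the values ws[k] < robot for k ∈ [j, ri) are added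
theorem solveInner_mem (ws : List Int) (robot : Int) (ri : Nat)
    (hs : List.Pairwise (fun a b => a ≤ b) ws) (hri : ri ≤ ws.length)
    (j : Nat) (s : PySem.Set Int) (x : Int) :
    x ∈ solveInner ws robot ri j s ↔
      x ∈ s ∨ ∃ k, j ≤ k ∧ k < ri ∧ ws.getD k 0 = x ∧ x < robot := by
  induction j, s using solveInner.induct ws robot ri with
  | case1 j s hj hb =>
    rw [solveInner]
    simp only [hj, if_true, hb, if_true]
    constructor
    · intro h; exact Or.inl h
    · rintro (h | ⟨k, hjk, hkri, hkx, hxr⟩)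
      · exact h
      · exfalso
        have hjl : j < ws.length := lt_of_lt_of_le hj hri
        have hkl : k < ws.length := lt_of_lt_of_le hkri hri
        have hle : ws[j] ≤ ws[k] := by
          rcases Nat.eq_or_lt_of_le hjk with h' | h'
          · subst h'; exact le_refl _
          · exact (List.pairwise_iff_getElem.mp hs) j k hjl hkl h'
        have hbj : robot ≤ ws[j] := by rwa [List.getD_eq_getElem ws 0 hjl] at hb
        have hkx' : ws[k] = x := by rwa [List.getD_eq_getElem ws 0 hkl] at hkx
        omega
  | case2 j s hj hb ih =>
    rw [solveInner]
    simp only [hj, if_true, hb, if_false]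
    rw [ih]
    have hnb : ws.getD j 0 < robot := by omega
    constructor
    · rintro (h | ⟨k, hjk, hkri, hkx, hxr⟩)
      · rw [PySem.Set.mem_add] at h
        rcases h with h | h
        · exact Or.inl h
        · exact Or.inr ⟨j, le_refl _, hj, h.symm, by omega⟩
      · exact Or.inr ⟨k, by omega, hkri, hkx, hxr⟩
    · rintro (h | ⟨k, hjk, hkri, hkx, hxr⟩)
      · exact Or.inl (by rw [PySem.Set.mem_add]; exact Or.inl h)
      · rcases Nat.eq_or_lt_of_le hjk with h' | h'
        · subst h'
          exact Or.inl (by rw [PySem.Set.mem_add]; exact Or.inr hkx.symm)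
        · exact Or.inr ⟨k, h', hkri, hkx, hxr⟩
  | case3 j s hj =>
    rw [solveInner]
    simp only [hj, if_false]
    constructor
    · intro h; exact Or.inl h
    · rintro (h | ⟨k, hjk, hkri, _, _⟩)
      · exact h
      · omega

theorem solveInner_nodup (ws : List Int) (robot : Int) (ri : Nat)
    (j : Nat) (s : PySem.Set Int) (hs : s.Nodup) : (solveInner ws robot ri j s).Nodup := by
  induction j, s using solveInner.induct ws robot ri with
  | case1 j s hj hb => rw [solveInner]; simp only [hj, if_true, hb, if_true]; exact hs
  | case2 j s hj hb ih =>
    rw [solveInner]; simp only [hj, if_true, hb, if_false]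
    exact ih (PySem.Set.nodup_add s _ hs)
  | case3 j s hj => rw [solveInner]; simp only [hj, if_false]; exact hs

-- the values added for one robot are exactly the walls w with r - d ≤ w < r
theorem stepA_mem (walls distance : List Int) (p : Int × Int) (x : Int) (s : PySem.Set Int) :
    x ∈ stepA (PySem.List.sorted walls (fun x => x) false) distance s p ↔
      x ∈ s ∨ (x ∈ walls ∧ p.2 - (PySem.List.pyGet? distance p.1).getD 0 ≤ x ∧ x < p.2) := by
  unfold stepA
  set ws := PySem.List.sorted walls (fun x => x) false with hws
  set robot := p.2
  set d := (PySem.List.pyGet? distance p.1).getD 0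
  have hsorted : List.Pairwise (fun a b => a ≤ b) ws := PySem.List.sorted_pairwise walls (fun x => x)
  obtain ⟨hriB, hri1, hri2⟩ := PySem.List.bisectRight_spec ws (robot + d) hsorted
  obtain ⟨hliB, hli1, hli2⟩ := PySem.List.bisectLeft_spec ws (robot - d) hsorted
  rw [solveInner_mem ws robot _ hsorted hriB]
  constructor
  · rintro (h | ⟨k, hlik, hkri, hkx, hxr⟩)
    · exact Or.inl h
    · right
      have hkl : k < ws.length := lt_of_lt_of_le hkri hriB
      have hkx' : ws[k] = x := by rwa [List.getD_eq_getElem ws 0 hkl] at hkx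
      have hmem : x ∈ ws := hkx' ▸ List.getElem_mem hkl
      have hlb : robot - d ≤ ws[k] := hli2 k hkl hlik
      rw [hws, PySem.List.mem_sorted] at hmem
      exact ⟨hmem, by omega, hxr⟩
  · rintro (h | ⟨hmem, hlb, hxr⟩)
    · exact Or.inl h
    · right
      have hmem' : x ∈ ws := by rw [hws, PySem.List.mem_sorted]; exact hmem
      obtain ⟨k, hkl, hkx⟩ := List.mem_iff_getElem.mp hmem'
      refine ⟨k, ?_, ?_, by rw [List.getD_eq_getElem ws 0 hkl]; exact hkx, hxr⟩
      · by_contra h'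
        have := hli1 k hkl (by omega)
        omega
      · by_contra h'
        have := hri2 k hkl (by omega)
        -- ws[k] = x > robot + d, but robot - d ≤ x < robot forces d ≥ 1: contradiction
        omega

-- generic: membership after the outer foldl
theorem foldl_mem_iff {α : Type} (f : PySem.Set Int → α → PySem.Set Int)
    (C : α → Int → Prop)
    (hf : ∀ s p x, x ∈ f s p ↔ x ∈ s ∨ C p x) :
    ∀ (l : List α) (s : PySem.Set Int) (x : Int),
      x ∈ l.foldl f s ↔ x ∈ s ∨ ∃ p ∈ l, C p x := by
  intro l
  induction l with
  | nil => intro s x; simp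
  | cons a t ih =>
    intro s x
    simp only [List.foldl_cons, ih, hf, List.mem_cons]
    constructor
    · rintro ((h | h) | ⟨p, hp, hc⟩)
      · exact Or.inl h
      · exact Or.inr ⟨a, Or.inl rfl, h⟩
      · exact Or.inr ⟨p, Or.inr hp, hc⟩
    · rintro (h | ⟨p, (rfl | hp), hc⟩)
      · exact Or.inl (Or.inl h)
      · exact Or.inl (Or.inr hc)
      · exact Or.inr ⟨p, hp, hc⟩

theorem foldl_nodup {α : Type} (f : PySem.Set Int → α → PySem.Set Int)
    (hf : ∀ s p, s.Nodup → (f s p).Nodup) :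
    ∀ (l : List α) (s : PySem.Set Int), s.Nodup → (l.foldl f s).Nodup := by
  intro l
  induction l with
  | nil => intro s hs; exact hs
  | cons a t ih => intro s hs; exact ih _ (hf s a hs)

-- ===== VERDICT (by name: the statement is the Claim_ definition above) =====
theorem solve_spec : Claim_equal_solve := by
  intro robots distance walls _ hpre
  unfold Spec_solve solve_alt
  rw [solve_eq_stepA]
  set ws := PySem.List.sorted walls (fun x => x) false with hws
  set C : (Int × Int) → Int → Prop := fun p x =>
    x ∈ walls ∧ p.2 - (PySem.List.pyGet? distance p.1).getD 0 ≤ x ∧ x < p.2 with hC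
  have hmemA : ∀ x, x ∈ (PySem.List.enumerate robots 0).foldl (stepA ws distance) PySem.Set.empty ↔
      ∃ p ∈ PySem.List.enumerate robots 0, C p x := by
    intro x
    rw [foldl_mem_iff (stepA ws distance) C (fun s p x => stepA_mem walls distance p x s)]
    simp [PySem.Set.empty]
  have hnodupA : ((PySem.List.enumerate robots 0).foldl (stepA ws distance) PySem.Set.empty).Nodup := by
    apply foldl_nodup (stepA ws distance)
    · intro s p hs
      exact solveInner_nodup ws p.2 _ _ s hs
    · simp [PySem.Set.empty]
  set pred : Int → Bool := fun w =>
    (robots.zip distance).any (fun q => decide (q.1 - q.2 ≤ w ∧ w < q.1)) with hpred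
  have hmemB : ∀ x, x ∈ (PySem.Set.ofList walls).filter pred ↔
      (x ∈ walls ∧ ∃ q ∈ robots.zip distance, q.1 - q.2 ≤ x ∧ x < q.1) := by
    intro x
    rw [List.mem_filter, PySem.Set.mem_ofList, hpred, List.any_eq_true]
    simp only [decide_eq_true_eq]
  have hnodupB : ((PySem.Set.ofList walls).filter pred).Nodup :=
    (PySem.Set.nodup_ofList walls).filter pred
  have hsame : ∀ x, x ∈ (PySem.List.enumerate robots 0).foldl (stepA ws distance) PySem.Set.empty ↔
      x ∈ (PySem.Set.ofList walls).filter pred := by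
    intro x
    rw [hmemA x, hmemB x]
    constructor
    · rintro ⟨p, hp, hm, hlb, hub⟩
      rw [PySem.List.mem_enumerate_iff] at hp
      obtain ⟨k, hk, rfl⟩ := hp
      have hkd : k < distance.length := lt_of_lt_of_le hk hpre
      have hd : (PySem.List.pyGet? distance ((0 : Int) + (k : Int))).getD 0 = distance[k] := by
        have h0 : ((0 : Int) + (k : Int)) = ((k : Nat) : Int) := by omega
        rw [h0, PySem.List.pyGet?_natCast, List.getElem?_eq_getElem hkd, Option.getD_some]
      dsimp only at hlb hub
      rw [hd] at hlb
      refine ⟨hm, (robots[k], distance[k]), ?_, hlb, hub⟩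
      rw [List.mem_iff_getElem]
      refine ⟨k, by rw [List.length_zip]; omega, by rw [List.getElem_zip]⟩
    · rintro ⟨hm, q, hq, hlb, hub⟩
      rw [List.mem_iff_getElem] at hq
      obtain ⟨k, hkl, hkq⟩ := hq
      have hkr : k < robots.length := by rw [List.length_zip] at hkl; omega
      have hkd : k < distance.length := by rw [List.length_zip] at hkl; omega
      have hq' : q = (robots[k], distance[k]) := by rw [← hkq, List.getElem_zip]
      rw [hq'] at hlb hub
      refine ⟨((0 : Int) + (k : Int), robots[k]), ?_, hm, ?_, by exact hub⟩
      · rw [PySem.List.mem_enumerate_iff]; exact ⟨k, hkr, rfl⟩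
      · have hd : (PySem.List.pyGet? distance ((0 : Int) + (k : Int))).getD 0 = distance[k] := by
          have h0 : ((0 : Int) + (k : Int)) = ((k : Nat) : Int) := by omega
          rw [h0, PySem.List.pyGet?_natCast, List.getElem?_eq_getElem hkd, Option.getD_some]
        dsimp only
        rw [hd]
        exact hlb
  have hperm : ((PySem.List.enumerate robots 0).foldl (stepA ws distance) PySem.Set.empty).Perm
      ((PySem.Set.ofList walls).filter pred) :=
    (List.perm_ext_iff_of_nodup hnodupA hnodupB).mpr hsame
  have hlen := hperm.length_eq
  simp only [PySem.Set.len, List.countP_eq_length_filter, Int.ofNat_eq_natCast]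
  exact_mod_cast hlen
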